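-- pv_equiv track=rewrite | github.com/akassh9/pitch-deck-analyzer | backend/utils.py | is_noise_page
-- ===== SOURCE A (Python) =====
-- def is_noise_page(text):
--     if not text:
--         return True
--     lower_text = text.lower()
--     noise_keywords = ['intro', 'introduction', 'thank you', 'thanks', 'acknowledgement', 'closing', 'end of presentation']
--     for keyword in noise_keywords:
--         if keyword in lower_text:
--             return True
--     return False
-- ===== SOURCE B (Python) =====
-- def is_noise_page(text):
--     if not text:
--         return True
--     s = text.lower()
--     # 'introduction' is dropped: every occurrence contains 'intro'.
--     keys = ('intro', 'thank you', 'thanks', 'acknowledgement', 'closing', 'end of presentation')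
--     # one left-to-right scan over positions, checking all keywords at each position
--     return any(s.startswith(keys, i) for i in range(len(s)))
-- ===== Notes on version B (the rewrite author's own statement) =====
-- stated objective: alternative
-- what changed: Replaced A's seven independent per-keyword substring scans by a single left-to-right scan over the positions of the lowered text that checks a tuple of keywords at each position (dropping the redundant 'introduction', every occurrence of which contains 'intro').
import Mathlib
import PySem

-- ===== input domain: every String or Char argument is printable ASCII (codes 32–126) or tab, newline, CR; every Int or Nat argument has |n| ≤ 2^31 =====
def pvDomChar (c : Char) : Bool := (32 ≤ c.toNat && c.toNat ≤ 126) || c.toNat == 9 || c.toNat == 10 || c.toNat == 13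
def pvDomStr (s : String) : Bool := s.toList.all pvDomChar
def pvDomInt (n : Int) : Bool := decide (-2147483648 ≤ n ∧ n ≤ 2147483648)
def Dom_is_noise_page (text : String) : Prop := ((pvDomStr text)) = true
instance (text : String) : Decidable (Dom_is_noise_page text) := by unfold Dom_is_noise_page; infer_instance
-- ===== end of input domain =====

-- B replaces A's per-keyword substring scans by a single left-to-right scan over the
-- positions of the lowered text, checking all keywords at each position (and drops the
-- redundant 'introduction', whose every occurrence contains 'intro'); objective: alternative.

-- ===== PORT A =====
def noiseKeywordsA : List String :=
  ["intro", "introduction", "thank you", "thanks", "acknowledgement", "closing", "end of presentation"]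

-- A: empty guard, then for-loop with early return over the keyword list = List.any
def is_noise_page (text : String) : Bool :=
  if text = "" then true
  else
    let lowerText := PySem.Str.lower text
    noiseKeywordsA.any (fun k => PySem.Str.isIn k lowerText)

-- ===== PORT B =====
def noiseKeysB : List (List Char) :=
  ["intro", "thank you", "thanks", "acknowledgement", "closing", "end of presentation"].map String.toList

-- the generator 'any(s.startswith(keys, i) for i in range(len(s)))': recursion over suffixes
def noiseScan (l : List Char) : Bool :=
  if noiseKeysB.any (fun k => PySem.Chars.startswith l k) then true
  else
    match l with
    | [] => false
    | _ :: t => noiseScan t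

def is_noise_page_alt (text : String) : Bool :=
  if text = "" then true
  else noiseScan (PySem.Str.lower text).toList

-- ===== PRECONDITION & SPEC =====
def Spec_is_noise_page (text : String) (out : Bool) : Prop := out = is_noise_page_alt text
instance (text : String) (out : Bool) : Decidable (Spec_is_noise_page text out) := by unfold Spec_is_noise_page; infer_instance

-- ===== CLAIM (what is proved, stated in full; the proofs are below) =====
def Claim_equal_is_noise_page : Prop := ∀ (text : String), Dom_is_noise_page text → Spec_is_noise_page text (is_noise_page text)

-- ===== LEMMAS AND PROOFS =====

-- the scan finds exactly the keywords that occur as infixes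
theorem noiseScan_iff (l : List Char) :
    noiseScan l = true ↔ ∃ k ∈ noiseKeysB, k <:+: l := by
  induction l with
  | nil =>
    simp only [noiseScan]
    constructor
    · intro h
      split at h
      · rename_i hany
        rw [List.any_eq_true] at hany
        obtain ⟨k, hk, hsw⟩ := hany
        exact ⟨k, hk, List.IsPrefix.isInfix ((PySem.Chars.startswith_iff _ _).1 hsw)⟩
      · exact absurd h (by simp)
    · rintro ⟨k, hk, hinf⟩
      have : k = [] := List.eq_nil_of_infix_nil hinf
      subst this
      exact absurd hk (by decide)
  | cons c t ih =>
    simp only [noiseScan]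
    split
    · rename_i hany
      rw [List.any_eq_true] at hany
      obtain ⟨k, hk, hsw⟩ := hany
      simp only [true_iff]
      exact ⟨k, hk, List.IsPrefix.isInfix ((PySem.Chars.startswith_iff _ _).1 hsw)⟩
    · rename_i hnot
      rw [ih]
      constructor
      · rintro ⟨k, hk, hinf⟩; exact ⟨k, hk, hinf.trans (List.suffix_cons c t).isInfix⟩
      · rintro ⟨k, hk, hinf⟩
        rcases List.infix_cons_iff.1 hinf with hpre | hsuf
        · exact absurd (List.any_eq_true.2 ⟨k, hk, (PySem.Chars.startswith_iff _ _).2 hpre⟩) hnot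
        · exact ⟨k, hk, hsuf⟩

-- 'intro' occurs wherever 'introduction' occurs, so the A-side keyword set detects the
-- same strings as the B-side one
theorem keys_equiv (l : List Char) :
    (∃ k ∈ noiseKeywordsA.map String.toList, k <:+: l) ↔ (∃ k ∈ noiseKeysB, k <:+: l) := by
  constructor
  · rintro ⟨k, hk, hinf⟩
    simp only [noiseKeywordsA, List.map_cons, List.map_nil, List.mem_cons,
      List.not_mem_nil, or_false] at hk
    rcases hk with h|h|h|h|h|h|h
    · exact ⟨k, by subst h; simp [noiseKeysB], hinf⟩
    · refine ⟨"intro".toList, by simp [noiseKeysB], ?_⟩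
      subst h
      exact List.IsInfix.trans (List.IsPrefix.isInfix (by decide)) hinf
    all_goals (subst h; exact ⟨_, by decide, hinf⟩)
  · rintro ⟨k, hk, hinf⟩
    simp only [noiseKeysB, List.map_cons, List.map_nil, List.mem_cons,
      List.not_mem_nil, or_false] at hk
    refine ⟨k, ?_, hinf⟩
    rcases hk with h|h|h|h|h|h <;> (subst h; decide)

-- ===== VERDICT (by name: the statement is the Claim_ definition above) =====
theorem is_noise_page_spec : Claim_equal_is_noise_page := by
  intro text _
  unfold Spec_is_noise_page is_noise_page is_noise_page_alt
  split
  · rfl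
  · rw [Bool.eq_iff_iff, noiseScan_iff, List.any_eq_true]
    rw [← keys_equiv (PySem.Str.lower text).toList]
    constructor
    · rintro ⟨k, hk, hin⟩
      exact ⟨k.toList, List.mem_map_of_mem hk,
        (PySem.Chars.isIn_iff_infix _ _).1 (by simpa using hin)⟩
    · rintro ⟨k, hk, hinf⟩
      obtain ⟨s, hs, rfl⟩ := List.mem_map.1 hk
      exact ⟨s, hs, by simpa using (PySem.Chars.isIn_iff_infix _ _).2 hinf⟩
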